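-- pv_equiv track=rewrite | github.com/teoaivalis/AutoGraphX | Graph_Fashion/graph_unlearning/insert_generated_neo4j.py | standardize_attribute
-- ===== SOURCE A (Python) =====
-- ATTRIBUTE_MAPPING = {
--     "hasSilhouette": {
--         "straight": ["straight", "straight cut", "straight silhouette"],
--         "a-line": ["a-line", "a-line silhouette", "a-line shape"],
--         "round": ["round", "round silhouette", "round neckline", "round-toe"],
--         "rectangular": ["rectangular", "rectangle", "rectangular silhouette"],
--         "slim-fit": ["slim fit", "slim-fit", "slim fitting silhouette"],
--         "loose-fit": ["loose fit", "loose-fitting", "loose silhouette"],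
--         "none": ["none", "no silhouette", "not applicable", "unspecified"]
--     },
--     "hasCollarType": {
--         "none": ["none", "no collar", "no-collar", "collarless"],
--         "crew-neck": ["crew neck", "crew-neck", "crewneck"],
--         "v-neck": ["v-neck", "v-neck collar", "v-neckline"],
--         "spread-collar": ["spread collar", "spread"],
--         "pointed-collar": ["pointed collar", "point collar"],
--         "mandarin-collar": ["mandarin collar", "mandarin"],
--         "notch-collar": ["notch collar", "notched collar"]
--     },
--     "hasSleeveType": {
--         "sleeveless": ["sleeveless", "no sleeves", "strapless"],
--         "short-sleeve": ["short sleeves", "short sleeve", "short-sleeved"],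
--         "long-sleeve": ["long sleeves", "long sleeve", "long-sleeved"],
--         "three-quarter-sleeve": ["three-quarter sleeve", "three-quarter"]
--     },
--     "hasPattern": {
--         "none": ["none", "no pattern", "plain", "solid"],
--         "striped": ["striped", "stripes", "stripe-pattern"],
--         "floral": ["floral", "floral pattern"],
--         "polka-dot": ["polka dots", "polka dot"],
--         "geometric": ["geometric", "geometric pattern"],
--         "animal-print": ["animal print", "zebra print", "leopard print", "tiger print"]
--     },
--     "hasWaistline": {
--         "none": ["none", "no waistline", "no-waistline"],
--         "high-waisted": ["high-waisted", "high waist"],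
--         "low-waisted": ["low-waisted", "low waist"],
--         "natural-waist": ["natural waist", "mid-rise"],
--         "straight": ["straight", "straight waistline"],
--         "fitted": ["fitted", "fitted waist"]
--     },
--     "hasLength": {
--         "short": ["short", "mini", "short length"],
--         "long": ["long", "long length", "floor-length"],
--         "midi": ["midi", "mid-length", "mid-calf"],
--         "ankle-length": ["ankle-length", "ankle"],
--         "knee-length": ["knee-length", "knee length"]
--     },
--     "hasOpeningType": {
--         "none": ["none", "no opening", "no openings"],
--         "button": ["button opening", "button-front", "buttoned"],
--         "zipper": ["zipper", "zippered", "zip-up"],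
--         "lace-up": ["lace-up", "laces"]
--     },
-- }
--
-- GENERAL_MAPPING = {
--     "plain": "solid",
--     "solid": "solid",
--     "no collar": "none",
--     "no lapel": "none",
--     "collarless": "none",
--     "no pockets": "none",
--     "no fabric treatment": "none",
--     "no animal pattern": "none",
--     "no opening": "none"
-- }
--
-- def standardize_attribute(attribute_type, attribute_value):
--     """
--     Standardizes an attribute based on predefined mappings.
--     """
--     attribute_value_lower = attribute_value.strip().lower()
--
--     # Check for standardization in specific attribute mappings
--     if attribute_type in ATTRIBUTE_MAPPING:
--         for standard, variations in ATTRIBUTE_MAPPING[attribute_type].items():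
--             if attribute_value_lower in [v.lower() for v in variations]:
--                 return standard
--
--     # Convert commonly skipped values into meaningful categories
--     if attribute_value_lower in GENERAL_MAPPING:
--         return GENERAL_MAPPING[attribute_value_lower]
--
--     # Skip truly empty values
--     if attribute_value_lower in ["none", "not applicable", "unspecified", "undefined", "no information available"]:
--         return None
--
--     return attribute_value_lower
-- ===== SOURCE B (Python) =====
-- # Flat precomputed reverse-lookup table: (attribute_type, variation) -> standard.
-- # All variations in the source mapping are already lowercase and unique per type,
-- # so a single exact-key lookup replaces the nested scan.
-- REVERSE = {
--     ('hasSilhouette', 'straight'): 'straight',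
--     ('hasSilhouette', 'straight cut'): 'straight',
--     ('hasSilhouette', 'straight silhouette'): 'straight',
--     ('hasSilhouette', 'a-line'): 'a-line',
--     ('hasSilhouette', 'a-line silhouette'): 'a-line',
--     ('hasSilhouette', 'a-line shape'): 'a-line',
--     ('hasSilhouette', 'round'): 'round',
--     ('hasSilhouette', 'round silhouette'): 'round',
--     ('hasSilhouette', 'round neckline'): 'round',
--     ('hasSilhouette', 'round-toe'): 'round',
--     ('hasSilhouette', 'rectangular'): 'rectangular',
--     ('hasSilhouette', 'rectangle'): 'rectangular',
--     ('hasSilhouette', 'rectangular silhouette'): 'rectangular',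
--     ('hasSilhouette', 'slim fit'): 'slim-fit',
--     ('hasSilhouette', 'slim-fit'): 'slim-fit',
--     ('hasSilhouette', 'slim fitting silhouette'): 'slim-fit',
--     ('hasSilhouette', 'loose fit'): 'loose-fit',
--     ('hasSilhouette', 'loose-fitting'): 'loose-fit',
--     ('hasSilhouette', 'loose silhouette'): 'loose-fit',
--     ('hasSilhouette', 'none'): 'none',
--     ('hasSilhouette', 'no silhouette'): 'none',
--     ('hasSilhouette', 'not applicable'): 'none',
--     ('hasSilhouette', 'unspecified'): 'none',
--     ('hasCollarType', 'none'): 'none',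
--     ('hasCollarType', 'no collar'): 'none',
--     ('hasCollarType', 'no-collar'): 'none',
--     ('hasCollarType', 'collarless'): 'none',
--     ('hasCollarType', 'crew neck'): 'crew-neck',
--     ('hasCollarType', 'crew-neck'): 'crew-neck',
--     ('hasCollarType', 'crewneck'): 'crew-neck',
--     ('hasCollarType', 'v-neck'): 'v-neck',
--     ('hasCollarType', 'v-neck collar'): 'v-neck',
--     ('hasCollarType', 'v-neckline'): 'v-neck',
--     ('hasCollarType', 'spread collar'): 'spread-collar',
--     ('hasCollarType', 'spread'): 'spread-collar',
--     ('hasCollarType', 'pointed collar'): 'pointed-collar',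
--     ('hasCollarType', 'point collar'): 'pointed-collar',
--     ('hasCollarType', 'mandarin collar'): 'mandarin-collar',
--     ('hasCollarType', 'mandarin'): 'mandarin-collar',
--     ('hasCollarType', 'notch collar'): 'notch-collar',
--     ('hasCollarType', 'notched collar'): 'notch-collar',
--     ('hasSleeveType', 'sleeveless'): 'sleeveless',
--     ('hasSleeveType', 'no sleeves'): 'sleeveless',
--     ('hasSleeveType', 'strapless'): 'sleeveless',
--     ('hasSleeveType', 'short sleeves'): 'short-sleeve',
--     ('hasSleeveType', 'short sleeve'): 'short-sleeve',
--     ('hasSleeveType', 'short-sleeved'): 'short-sleeve',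
--     ('hasSleeveType', 'long sleeves'): 'long-sleeve',
--     ('hasSleeveType', 'long sleeve'): 'long-sleeve',
--     ('hasSleeveType', 'long-sleeved'): 'long-sleeve',
--     ('hasSleeveType', 'three-quarter sleeve'): 'three-quarter-sleeve',
--     ('hasSleeveType', 'three-quarter'): 'three-quarter-sleeve',
--     ('hasPattern', 'none'): 'none',
--     ('hasPattern', 'no pattern'): 'none',
--     ('hasPattern', 'plain'): 'none',
--     ('hasPattern', 'solid'): 'none',
--     ('hasPattern', 'striped'): 'striped',
--     ('hasPattern', 'stripes'): 'striped',
--     ('hasPattern', 'stripe-pattern'): 'striped',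
--     ('hasPattern', 'floral'): 'floral',
--     ('hasPattern', 'floral pattern'): 'floral',
--     ('hasPattern', 'polka dots'): 'polka-dot',
--     ('hasPattern', 'polka dot'): 'polka-dot',
--     ('hasPattern', 'geometric'): 'geometric',
--     ('hasPattern', 'geometric pattern'): 'geometric',
--     ('hasPattern', 'animal print'): 'animal-print',
--     ('hasPattern', 'zebra print'): 'animal-print',
--     ('hasPattern', 'leopard print'): 'animal-print',
--     ('hasPattern', 'tiger print'): 'animal-print',
--     ('hasWaistline', 'none'): 'none',
--     ('hasWaistline', 'no waistline'): 'none',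
--     ('hasWaistline', 'no-waistline'): 'none',
--     ('hasWaistline', 'high-waisted'): 'high-waisted',
--     ('hasWaistline', 'high waist'): 'high-waisted',
--     ('hasWaistline', 'low-waisted'): 'low-waisted',
--     ('hasWaistline', 'low waist'): 'low-waisted',
--     ('hasWaistline', 'natural waist'): 'natural-waist',
--     ('hasWaistline', 'mid-rise'): 'natural-waist',
--     ('hasWaistline', 'straight'): 'straight',
--     ('hasWaistline', 'straight waistline'): 'straight',
--     ('hasWaistline', 'fitted'): 'fitted',
--     ('hasWaistline', 'fitted waist'): 'fitted',
--     ('hasLength', 'short'): 'short',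
--     ('hasLength', 'mini'): 'short',
--     ('hasLength', 'short length'): 'short',
--     ('hasLength', 'long'): 'long',
--     ('hasLength', 'long length'): 'long',
--     ('hasLength', 'floor-length'): 'long',
--     ('hasLength', 'midi'): 'midi',
--     ('hasLength', 'mid-length'): 'midi',
--     ('hasLength', 'mid-calf'): 'midi',
--     ('hasLength', 'ankle-length'): 'ankle-length',
--     ('hasLength', 'ankle'): 'ankle-length',
--     ('hasLength', 'knee-length'): 'knee-length',
--     ('hasLength', 'knee length'): 'knee-length',
--     ('hasOpeningType', 'none'): 'none',
--     ('hasOpeningType', 'no opening'): 'none',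
--     ('hasOpeningType', 'no openings'): 'none',
--     ('hasOpeningType', 'button opening'): 'button',
--     ('hasOpeningType', 'button-front'): 'button',
--     ('hasOpeningType', 'buttoned'): 'button',
--     ('hasOpeningType', 'zipper'): 'zipper',
--     ('hasOpeningType', 'zippered'): 'zipper',
--     ('hasOpeningType', 'zip-up'): 'zipper',
--     ('hasOpeningType', 'lace-up'): 'lace-up',
--     ('hasOpeningType', 'laces'): 'lace-up',
-- }
--
-- GENERAL_MAPPING = {
--     "plain": "solid",
--     "solid": "solid",
--     "no collar": "none",
--     "no lapel": "none",
--     "collarless": "none",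
--     "no pockets": "none",
--     "no fabric treatment": "none",
--     "no animal pattern": "none",
--     "no opening": "none"
-- }
--
-- SKIP = {"none", "not applicable", "unspecified", "undefined", "no information available"}
--
-- def standardize_attribute(attribute_type, attribute_value):
--     """Standardizes an attribute via one flat reverse-table lookup."""
--     s = attribute_value.strip().lower()
--     r = REVERSE.get((attribute_type, s))
--     if r is not None:
--         return r
--     g = GENERAL_MAPPING.get(s)
--     if g is not None:
--         return g
--     return None if s in SKIP else s
-- ===== Notes on version B (the rewrite author's own statement) =====
-- stated objective: simpler
-- what changed: A's per-call two-level scan over the nested ATTRIBUTE_MAPPING (building a lowered copy of each variation list inside the loop) is replaced by a flat precomputed reverse-lookup table keyed by (attribute_type, variation) with a single exact-key .get, followed by .get-chaining for the general mapping and a skip set.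
import Mathlib
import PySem

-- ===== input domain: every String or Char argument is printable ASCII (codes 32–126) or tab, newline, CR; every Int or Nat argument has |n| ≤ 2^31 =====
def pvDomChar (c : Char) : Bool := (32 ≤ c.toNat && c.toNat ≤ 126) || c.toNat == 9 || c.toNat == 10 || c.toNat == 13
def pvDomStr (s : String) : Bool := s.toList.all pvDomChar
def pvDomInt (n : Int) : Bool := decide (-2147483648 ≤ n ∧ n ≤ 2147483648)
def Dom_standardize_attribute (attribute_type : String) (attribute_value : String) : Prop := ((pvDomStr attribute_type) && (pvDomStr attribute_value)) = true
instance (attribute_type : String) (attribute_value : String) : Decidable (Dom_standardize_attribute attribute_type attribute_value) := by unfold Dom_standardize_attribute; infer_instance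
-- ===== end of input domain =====

-- B replaces A's per-call two-level scan of the nested mapping with a flat precomputed
-- reverse-lookup table (attribute_type, variation) -> standard and a single exact-key lookup.

-- ===== PORT A =====
-- Module constant of A: the nested dict ATTRIBUTE_MAPPING, as an association list.
def ATTRIBUTE_MAPPING : List (String × List (String × List String)) := [
  ("hasSilhouette", [("straight", ["straight", "straight cut", "straight silhouette"]), ("a-line", ["a-line", "a-line silhouette", "a-line shape"]), ("round", ["round", "round silhouette", "round neckline", "round-toe"]), ("rectangular", ["rectangular", "rectangle", "rectangular silhouette"]), ("slim-fit", ["slim fit", "slim-fit", "slim fitting silhouette"]), ("loose-fit", ["loose fit", "loose-fitting", "loose silhouette"]), ("none", ["none", "no silhouette", "not applicable", "unspecified"])]),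
  ("hasCollarType", [("none", ["none", "no collar", "no-collar", "collarless"]), ("crew-neck", ["crew neck", "crew-neck", "crewneck"]), ("v-neck", ["v-neck", "v-neck collar", "v-neckline"]), ("spread-collar", ["spread collar", "spread"]), ("pointed-collar", ["pointed collar", "point collar"]), ("mandarin-collar", ["mandarin collar", "mandarin"]), ("notch-collar", ["notch collar", "notched collar"])]),
  ("hasSleeveType", [("sleeveless", ["sleeveless", "no sleeves", "strapless"]), ("short-sleeve", ["short sleeves", "short sleeve", "short-sleeved"]), ("long-sleeve", ["long sleeves", "long sleeve", "long-sleeved"]), ("three-quarter-sleeve", ["three-quarter sleeve", "three-quarter"])]),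
  ("hasPattern", [("none", ["none", "no pattern", "plain", "solid"]), ("striped", ["striped", "stripes", "stripe-pattern"]), ("floral", ["floral", "floral pattern"]), ("polka-dot", ["polka dots", "polka dot"]), ("geometric", ["geometric", "geometric pattern"]), ("animal-print", ["animal print", "zebra print", "leopard print", "tiger print"])]),
  ("hasWaistline", [("none", ["none", "no waistline", "no-waistline"]), ("high-waisted", ["high-waisted", "high waist"]), ("low-waisted", ["low-waisted", "low waist"]), ("natural-waist", ["natural waist", "mid-rise"]), ("straight", ["straight", "straight waistline"]), ("fitted", ["fitted", "fitted waist"])]),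
  ("hasLength", [("short", ["short", "mini", "short length"]), ("long", ["long", "long length", "floor-length"]), ("midi", ["midi", "mid-length", "mid-calf"]), ("ankle-length", ["ankle-length", "ankle"]), ("knee-length", ["knee-length", "knee length"])]),
  ("hasOpeningType", [("none", ["none", "no opening", "no openings"]), ("button", ["button opening", "button-front", "buttoned"]), ("zipper", ["zipper", "zippered", "zip-up"]), ("lace-up", ["lace-up", "laces"])])
]

-- GENERAL_MAPPING dict (shared module constant of A and B).
def GENERAL_MAPPING : List (String × String) := [("plain", "solid"), ("solid", "solid"), ("no collar", "none"), ("no lapel", "none"), ("collarless", "none"), ("no pockets", "none"), ("no fabric treatment", "none"), ("no animal pattern", "none"), ("no opening", "none")]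

-- dict membership/lookup on an association list: first matching key wins (exact for a Python dict).
def pvLookup {a : Type} (k : String) : List (String × a) -> Option a
  | [] => none
  | (k2, v) :: rest => if k2 == k then some v else pvLookup k rest

-- A's inner loop: 'for standard, variations in ….items(): if value in [v.lower() for v in variations]: return standard'
def pvScanA (s : String) : List (String × List String) -> Option String
  | [] => none
  | (std, vars) :: rest => if s ∈ vars.map PySem.Str.lower then some std else pvScanA s rest

-- A's code after the first block: GENERAL_MAPPING check, the skip list, the fallthrough.
def pvTailA (s : String) : Option String :=
  match pvLookup s GENERAL_MAPPING with
  | some g => some g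
  | none =>
    if s ∈ ["none", "not applicable", "unspecified", "undefined", "no information available"] then none
    else some s

def standardize_attribute (attribute_type : String) (attribute_value : String) : Option String :=
  let s := PySem.Str.lower (PySem.Str.strip attribute_value)
  match pvLookup attribute_type ATTRIBUTE_MAPPING with
  | some inner =>
    match pvScanA s inner with
    | some std => some std
    | none => pvTailA s
  | none => pvTailA s

-- ===== PORT B =====
-- B's module constant: the flat reverse table literal (a Python dict with distinct keys;
-- exact-key .get on it is first-match lookup on this association list).
def REVERSE : List ((String × String) × String) := [
  (("hasSilhouette", "straight"), "straight"),
  (("hasSilhouette", "straight cut"), "straight"),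
  (("hasSilhouette", "straight silhouette"), "straight"),
  (("hasSilhouette", "a-line"), "a-line"),
  (("hasSilhouette", "a-line silhouette"), "a-line"),
  (("hasSilhouette", "a-line shape"), "a-line"),
  (("hasSilhouette", "round"), "round"),
  (("hasSilhouette", "round silhouette"), "round"),
  (("hasSilhouette", "round neckline"), "round"),
  (("hasSilhouette", "round-toe"), "round"),
  (("hasSilhouette", "rectangular"), "rectangular"),
  (("hasSilhouette", "rectangle"), "rectangular"),
  (("hasSilhouette", "rectangular silhouette"), "rectangular"),
  (("hasSilhouette", "slim fit"), "slim-fit"),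
  (("hasSilhouette", "slim-fit"), "slim-fit"),
  (("hasSilhouette", "slim fitting silhouette"), "slim-fit"),
  (("hasSilhouette", "loose fit"), "loose-fit"),
  (("hasSilhouette", "loose-fitting"), "loose-fit"),
  (("hasSilhouette", "loose silhouette"), "loose-fit"),
  (("hasSilhouette", "none"), "none"),
  (("hasSilhouette", "no silhouette"), "none"),
  (("hasSilhouette", "not applicable"), "none"),
  (("hasSilhouette", "unspecified"), "none"),
  (("hasCollarType", "none"), "none"),
  (("hasCollarType", "no collar"), "none"),
  (("hasCollarType", "no-collar"), "none"),
  (("hasCollarType", "collarless"), "none"),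
  (("hasCollarType", "crew neck"), "crew-neck"),
  (("hasCollarType", "crew-neck"), "crew-neck"),
  (("hasCollarType", "crewneck"), "crew-neck"),
  (("hasCollarType", "v-neck"), "v-neck"),
  (("hasCollarType", "v-neck collar"), "v-neck"),
  (("hasCollarType", "v-neckline"), "v-neck"),
  (("hasCollarType", "spread collar"), "spread-collar"),
  (("hasCollarType", "spread"), "spread-collar"),
  (("hasCollarType", "pointed collar"), "pointed-collar"),
  (("hasCollarType", "point collar"), "pointed-collar"),
  (("hasCollarType", "mandarin collar"), "mandarin-collar"),
  (("hasCollarType", "mandarin"), "mandarin-collar"),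
  (("hasCollarType", "notch collar"), "notch-collar"),
  (("hasCollarType", "notched collar"), "notch-collar"),
  (("hasSleeveType", "sleeveless"), "sleeveless"),
  (("hasSleeveType", "no sleeves"), "sleeveless"),
  (("hasSleeveType", "strapless"), "sleeveless"),
  (("hasSleeveType", "short sleeves"), "short-sleeve"),
  (("hasSleeveType", "short sleeve"), "short-sleeve"),
  (("hasSleeveType", "short-sleeved"), "short-sleeve"),
  (("hasSleeveType", "long sleeves"), "long-sleeve"),
  (("hasSleeveType", "long sleeve"), "long-sleeve"),
  (("hasSleeveType", "long-sleeved"), "long-sleeve"),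
  (("hasSleeveType", "three-quarter sleeve"), "three-quarter-sleeve"),
  (("hasSleeveType", "three-quarter"), "three-quarter-sleeve"),
  (("hasPattern", "none"), "none"),
  (("hasPattern", "no pattern"), "none"),
  (("hasPattern", "plain"), "none"),
  (("hasPattern", "solid"), "none"),
  (("hasPattern", "striped"), "striped"),
  (("hasPattern", "stripes"), "striped"),
  (("hasPattern", "stripe-pattern"), "striped"),
  (("hasPattern", "floral"), "floral"),
  (("hasPattern", "floral pattern"), "floral"),
  (("hasPattern", "polka dots"), "polka-dot"),
  (("hasPattern", "polka dot"), "polka-dot"),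
  (("hasPattern", "geometric"), "geometric"),
  (("hasPattern", "geometric pattern"), "geometric"),
  (("hasPattern", "animal print"), "animal-print"),
  (("hasPattern", "zebra print"), "animal-print"),
  (("hasPattern", "leopard print"), "animal-print"),
  (("hasPattern", "tiger print"), "animal-print"),
  (("hasWaistline", "none"), "none"),
  (("hasWaistline", "no waistline"), "none"),
  (("hasWaistline", "no-waistline"), "none"),
  (("hasWaistline", "high-waisted"), "high-waisted"),
  (("hasWaistline", "high waist"), "high-waisted"),
  (("hasWaistline", "low-waisted"), "low-waisted"),
  (("hasWaistline", "low waist"), "low-waisted"),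
  (("hasWaistline", "natural waist"), "natural-waist"),
  (("hasWaistline", "mid-rise"), "natural-waist"),
  (("hasWaistline", "straight"), "straight"),
  (("hasWaistline", "straight waistline"), "straight"),
  (("hasWaistline", "fitted"), "fitted"),
  (("hasWaistline", "fitted waist"), "fitted"),
  (("hasLength", "short"), "short"),
  (("hasLength", "mini"), "short"),
  (("hasLength", "short length"), "short"),
  (("hasLength", "long"), "long"),
  (("hasLength", "long length"), "long"),
  (("hasLength", "floor-length"), "long"),
  (("hasLength", "midi"), "midi"),
  (("hasLength", "mid-length"), "midi"),
  (("hasLength", "mid-calf"), "midi"),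
  (("hasLength", "ankle-length"), "ankle-length"),
  (("hasLength", "ankle"), "ankle-length"),
  (("hasLength", "knee-length"), "knee-length"),
  (("hasLength", "knee length"), "knee-length"),
  (("hasOpeningType", "none"), "none"),
  (("hasOpeningType", "no opening"), "none"),
  (("hasOpeningType", "no openings"), "none"),
  (("hasOpeningType", "button opening"), "button"),
  (("hasOpeningType", "button-front"), "button"),
  (("hasOpeningType", "buttoned"), "button"),
  (("hasOpeningType", "zipper"), "zipper"),
  (("hasOpeningType", "zippered"), "zipper"),
  (("hasOpeningType", "zip-up"), "zipper"),
  (("hasOpeningType", "lace-up"), "lace-up"),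
  (("hasOpeningType", "laces"), "lace-up")]

def SKIP : List String := ["none", "not applicable", "unspecified", "undefined", "no information available"]

-- REVERSE.get((t, s)): first-match lookup by exact pair key.
def revGet (k : String × String) : List ((String × String) × String) -> Option String
  | [] => none
  | (k2, v) :: rest => if k2 == k then some v else revGet k rest

-- GENERAL_MAPPING.get(s)
def genGet (k : String) : List (String × String) -> Option String
  | [] => none
  | (k2, v) :: rest => if k2 == k then some v else genGet k rest

def standardize_attribute_alt (attribute_type : String) (attribute_value : String) : Option String :=
  let s := PySem.Str.lower (PySem.Str.strip attribute_value)
  match revGet (attribute_type, s) REVERSE with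
  | some r => some r
  | none =>
    match genGet s GENERAL_MAPPING with
    | some g => some g
    | none => if s ∈ SKIP then none else some s

-- ===== PRECONDITION & SPEC =====
def Spec_standardize_attribute (attribute_type : String) (attribute_value : String) (out : Option String) : Prop := out = standardize_attribute_alt attribute_type attribute_value
instance (attribute_type : String) (attribute_value : String) (out : Option String) : Decidable (Spec_standardize_attribute attribute_type attribute_value out) := by unfold Spec_standardize_attribute; infer_instance

-- ===== CLAIM =====
def Claim_equal_standardize_attribute : Prop := ∀ (attribute_type : String) (attribute_value : String), Dom_standardize_attribute attribute_type attribute_value → Spec_standardize_attribute attribute_type attribute_value (standardize_attribute attribute_type attribute_value)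

-- ===== LEMMAS AND PROOFS =====

-- B's literal table is exactly A's nested mapping flattened in scan order.
theorem REVERSE_eq_flat :
    REVERSE = ATTRIBUTE_MAPPING.flatMap (fun p =>
      p.2.flatMap (fun q => q.2.map (fun v => ((p.1, PySem.Str.lower v), q.1)))) := by
  decide

-- one variation list flattened for (t, std): first-match search = membership test
theorem revGet_seg (t s std : String) (vars : List String)
    (L : List ((String × String) × String)) :
    revGet (t, s) ((vars.map (fun v => ((t, PySem.Str.lower v), std))) ++ L)
      = (if s ∈ vars.map PySem.Str.lower then some std else revGet (t, s) L) := by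
  induction vars with
  | nil => simp
  | cons w ws ih =>
    simp only [List.map_cons, List.cons_append, revGet, List.mem_cons]
    by_cases hw : PySem.Str.lower w = s
    · simp [hw]
    · have hb : ((t, PySem.Str.lower w) == (t, s)) = false := by
        simp [Prod.ext_iff, hw]
      rw [hb]
      simp only [Bool.false_eq_true, if_neg, not_false_iff]
      rw [ih]
      have : ¬ (s = PySem.Str.lower w) := fun h => hw h.symm
      simp [this]

-- one variation list flattened for a DIFFERENT outer key: search skips it entirely
theorem revGet_seg_skip (t t2 s std : String) (vars : List String)
    (L : List ((String × String) × String)) (h : t2 ≠ t) :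
    revGet (t, s) ((vars.map (fun v => ((t2, PySem.Str.lower v), std))) ++ L)
      = revGet (t, s) L := by
  induction vars with
  | nil => simp
  | cons w ws ih =>
    simp only [List.map_cons, List.cons_append, revGet]
    have hb : ((t2, PySem.Str.lower w) == (t, s)) = false := by
      simp [Prod.ext_iff, h]
    rw [hb]
    simp only [Bool.false_eq_true, if_neg, not_false_iff]
    exact ih

-- searching the flattened entries of one inner dict, then a remainder
theorem revGet_inner (t s : String) (inner : List (String × List String))
    (L : List ((String × String) × String)) :
    revGet (t, s) ((inner.flatMap (fun q => q.2.map (fun v => ((t, PySem.Str.lower v), q.1)))) ++ L)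
      = (match pvScanA s inner with
         | some std => some std
         | none => revGet (t, s) L) := by
  induction inner with
  | nil => simp [pvScanA]
  | cons q rest ih =>
    simp only [List.flatMap_cons, List.append_assoc]
    rw [revGet_seg, pvScanA]
    by_cases hmem : s ∈ q.2.map PySem.Str.lower
    · simp [hmem]
    · simp only [hmem, if_neg, not_false_iff]
      exact ih

-- skipping the flattened entries of an inner dict whose outer key differs
theorem revGet_skip (t t2 s : String) (inner : List (String × List String))
    (L : List ((String × String) × String)) (h : t2 ≠ t) :
    revGet (t, s) ((inner.flatMap (fun q => q.2.map (fun v => ((t2, PySem.Str.lower v), q.1)))) ++ L)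
      = revGet (t, s) L := by
  induction inner with
  | nil => simp
  | cons q rest ih =>
    simp only [List.flatMap_cons, List.append_assoc]
    rw [revGet_seg_skip _ _ _ _ _ _ h]
    exact ih

-- no entry of the flattened reverse list of M has outer key t when t is not an outer key of M
theorem revGet_none (t s : String) (M : List (String × List (String × List String)))
    (h : t ∉ M.map Prod.fst) :
    revGet (t, s) (M.flatMap (fun p => p.2.flatMap (fun q => q.2.map (fun v => ((p.1, PySem.Str.lower v), q.1))))) = none := by
  induction M with
  | nil => rfl
  | cons p rest ih =>
    simp only [List.map_cons, List.mem_cons, not_or] at h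
    simp only [List.flatMap_cons]
    rw [revGet_skip t p.1 s p.2 _ (fun he => h.1 he.symm)]
    exact ih h.2

-- main bridge: first-match lookup in the flat table = A's two-level scan
theorem revGet_eq_scan (t s : String) (M : List (String × List (String × List String)))
    (hnd : (M.map Prod.fst).Nodup) :
    revGet (t, s) (M.flatMap (fun p => p.2.flatMap (fun q => q.2.map (fun v => ((p.1, PySem.Str.lower v), q.1)))))
      = (match pvLookup t M with
         | some inner =>
           (match pvScanA s inner with
            | some std => some std
            | none => none)
         | none => none) := by
  induction M with
  | nil => rfl
  | cons p rest ih =>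
    simp only [List.map_cons, List.nodup_cons] at hnd
    simp only [List.flatMap_cons, pvLookup]
    by_cases hpt : p.1 = t
    · subst hpt
      simp only [beq_self_eq_true, if_pos]
      rw [revGet_inner, revGet_none _ _ _ hnd.1]
    · have hb : (p.1 == t) = false := by simp [hpt]
      rw [hb]
      simp only [Bool.false_eq_true, if_neg, not_false_iff]
      rw [revGet_skip _ _ _ _ _ hpt]
      exact ih hnd.2

theorem nodup_outer_keys : ((ATTRIBUTE_MAPPING.map Prod.fst).Nodup) := by decide

-- B's .get on GENERAL_MAPPING = A's dict membership-then-index (both first-match lookup)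
theorem genGet_eq_pvLookup (k : String) (L : List (String × String)) :
    genGet k L = pvLookup k L := by
  induction L with
  | nil => rfl
  | cons p rest ih =>
    simp only [genGet, pvLookup]
    cases p with
    | mk k2 v => by_cases h : k2 == k <;> simp [h, ih]

-- ===== VERDICT =====
theorem standardize_attribute_spec : Claim_equal_standardize_attribute := by
  intro t v _
  show standardize_attribute t v = standardize_attribute_alt t v
  unfold standardize_attribute standardize_attribute_alt
  simp only [REVERSE_eq_flat, genGet_eq_pvLookup]
  rw [revGet_eq_scan t _ ATTRIBUTE_MAPPING nodup_outer_keys]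
  cases hL : pvLookup t ATTRIBUTE_MAPPING with
  | none => simp [pvTailA, SKIP]
  | some inner =>
    cases hS : pvScanA (PySem.Str.lower (PySem.Str.strip v)) inner <;>
      simp [hS, pvTailA, SKIP]
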